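-- pv_equiv track=rewrite | github.com/tw-yoo/prj-vis-exp-pipeline | opsspec/runtime/execution_plan.py | _ordered_group_names
-- ===== SOURCE A (Python) =====
-- from typing import Any, Dict, List
--
-- def _ordered_group_names(group_names: List[str]) -> List[str]:
--     unique: List[str] = []
--     seen: set[str] = set()
--     for name in group_names:
--         if not isinstance(name, str):
--             continue
--         if name in seen:
--             continue
--         seen.add(name)
--         unique.append(name)
--     ordered: List[str] = []
--     if "ops" in unique:
--         ordered.append("ops")
--     ordered.extend(
--         sorted(
--             [name for name in unique if name.startswith("ops") and name[3:].isdigit()],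
--             key=lambda name: int(name[3:]),
--         )
--     )
--     ordered.extend(sorted([name for name in unique if name not in ordered]))
--     return ordered
-- ===== SOURCE B (Python) =====
-- from typing import List
--
--
-- def _keyfn(name: str):
--     if name == "ops":
--         return (0,)
--     if name.startswith("ops") and name[3:].isdigit():
--         return (1, int(name[3:]))
--     return (2, name)
--
--
-- def _ordered_group_names(group_names: List[str]) -> List[str]:
--     unique = dict.fromkeys(n for n in group_names if isinstance(n, str))
--     return sorted(unique, key=_keyfn)
-- ===== Notes on version B (the rewrite author's own statement) =====
-- stated objective: simpler
-- what changed: Dedup becomes dict.fromkeys and the whole three-group assembly (ops membership test, two filter comprehensions, the quadratic 'name not in ordered' rescan, two separate sorts) is replaced by ONE stable sort of the deduped list under a category tuple key (0,) / (1, int(suffix)) / (2, name).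
import Mathlib
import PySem

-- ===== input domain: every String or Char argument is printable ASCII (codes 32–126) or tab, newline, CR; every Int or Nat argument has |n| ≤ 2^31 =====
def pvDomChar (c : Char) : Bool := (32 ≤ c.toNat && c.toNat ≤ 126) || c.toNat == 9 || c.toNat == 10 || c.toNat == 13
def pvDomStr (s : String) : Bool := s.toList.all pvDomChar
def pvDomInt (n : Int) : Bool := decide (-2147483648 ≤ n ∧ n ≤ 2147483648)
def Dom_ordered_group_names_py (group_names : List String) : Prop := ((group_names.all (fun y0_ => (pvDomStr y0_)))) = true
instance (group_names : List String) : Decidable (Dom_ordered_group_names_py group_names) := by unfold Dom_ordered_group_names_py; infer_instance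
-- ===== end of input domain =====

-- B replaces A's three-group assembly (ops membership test, two filter
-- comprehensions, the 'name not in ordered' list rescan, two sorts) by a single
-- stable sort of the deduped list under a category key; return value only.

-- name.startswith("ops") and name[3:].isdigit()   (shared text of both Pythons)
def opsNumPred (name : String) : Bool :=
  PySem.Str.startswith name "ops" && PySem.Str.strIsdigit (PySem.Str.slice name (some 3) none)

-- int(name[3:]); both Pythons evaluate it only under opsNumPred, where ofStr? is some
-- on the ASCII domain, so the .getD 0 default is never the value used.
def opsKey (name : String) : Int :=
  (PySem.Int.ofStr? (PySem.Str.slice name (some 3) none)).getD 0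

-- ===== PORT A =====
-- loop body of A's dedup loop (seen-set, unique-list accumulator); the
-- 'isinstance(name, str)' guard is always true at type List String
def stepA (st : List String × PySem.Set String) (name : String) : List String × PySem.Set String :=
  if name ∈ st.2 then st else (st.1 ++ [name], PySem.Set.add st.2 name)

def ordered_group_names_py (group_names : List String) : List String :=
  let st := group_names.foldl stepA ([], PySem.Set.ofList [])
  let unique := st.1
  let ordered0 : List String := if "ops" ∈ unique then ["ops"] else []
  let ordered1 := ordered0 ++ PySem.List.sorted (unique.filter (fun n => opsNumPred n)) (fun n => opsKey n) false
  ordered1 ++ PySem.List.sorted (unique.filter (fun n => decide (n ∉ ordered1))) (fun n => n) false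

-- ===== PORT B =====
-- _keyfn: Python's lazily compared tuples (0,) / (1, int(suffix)) / (2, name) are
-- exactly the lexicographic sum order Unit ⊕ₗ (Int ⊕ₗ String)
def keyfnB (name : String) : Lex (Unit ⊕ Lex (Int ⊕ String)) :=
  if name = "ops" then toLex (Sum.inl ())
  else if opsNumPred name then toLex (Sum.inr (toLex (Sum.inl (opsKey name))))
  else toLex (Sum.inr (toLex (Sum.inr name)))

-- dict.fromkeys over the (always-true) isinstance filter, then one sorted(·, key=_keyfn)
def ordered_group_names_py_alt (group_names : List String) : List String :=
  PySem.List.sorted (PySem.List.dedup group_names) keyfnB false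

-- ===== PRECONDITION & SPEC =====
def Spec_ordered_group_names_py (group_names : List String) (out : List String) : Prop := out = ordered_group_names_py_alt group_names
instance (group_names : List String) (out : List String) : Decidable (Spec_ordered_group_names_py group_names out) := by unfold Spec_ordered_group_names_py; infer_instance

-- ===== CLAIM (what is proved, stated in full; the proofs are below) =====
def Claim_equal_ordered_group_names_py : Prop := ∀ (group_names : List String), Dom_ordered_group_names_py group_names → Spec_ordered_group_names_py group_names (ordered_group_names_py group_names)

-- ===== LEMMAS AND PROOFS =====

-- A's dedup loop keeps its unique-list equal to its seen-set (as a list)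
lemma foldA_eq (xs : List String) : ∀ (s : PySem.Set String),
    xs.foldl stepA (s, s) = (List.foldl PySem.Set.add s xs, List.foldl PySem.Set.add s xs) := by
  induction xs with
  | nil => intro s; simp
  | cons x xs ih =>
    intro s
    rw [List.foldl_cons, List.foldl_cons]
    by_cases h : x ∈ s
    · rw [show stepA (s, s) x = (s, s) from by simp [stepA, h],
        show PySem.Set.add s x = s from by simp [PySem.Set.add, PySem.Set.contains, h], ih]
    · rw [show stepA (s, s) x = (s ++ [x], PySem.Set.add s x) from by simp [stepA, h],
        show PySem.Set.add s x = s ++ [x] from by simp [PySem.Set.add, PySem.Set.contains, h]]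
      exact ih (s ++ [x])

-- insertBy goes entirely to the right of a block it is ordered after
lemma insertBy_append_right {α : Type} (before : α → α → Bool) (x : α) (l r : List α)
    (h : ∀ y ∈ l, before x y = false) :
    PySem.List.insertBy before x (l ++ r) = l ++ PySem.List.insertBy before x r := by
  induction l with
  | nil => simp
  | cons a l ih =>
    have ha := h a (by simp)
    simp only [List.cons_append, PySem.List.insertBy, ha]
    simp only [Bool.false_eq_true, if_false, List.cons.injEq, true_and]
    exact ih (fun y hy => h y (by simp [hy]))

-- insertBy stays entirely inside a block it is ordered before the rest of
lemma insertBy_append_left {α : Type} (before : α → α → Bool) (x : α) (l r : List α)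
    (h : ∀ y ∈ r, before x y = true) :
    PySem.List.insertBy before x (l ++ r) = PySem.List.insertBy before x l ++ r := by
  induction l with
  | nil =>
    cases r with
    | nil => simp
    | cons b r => simp [PySem.List.insertBy, h b (by simp)]
  | cons a l ih =>
    by_cases ha : before x a = true
    · simp [PySem.List.insertBy, ha]
    · simp only [List.cons_append, PySem.List.insertBy, ha]
      simp [ih]

lemma mem_insertBy' {α : Type} (before : α → α → Bool) (x y : α) (ys : List α) :
    y ∈ PySem.List.insertBy before x ys → y = x ∨ y ∈ ys := by
  intro h; exact (PySem.List.mem_insertBy before x y ys).1 h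

-- a stable insertion sort splits at a predicate whose two classes are strictly separated
lemma foldl_insertBy_split {α : Type} (before : α → α → Bool) (p : α → Bool) (S : List α)
    (hS : ∀ a b, a ∈ S → b ∈ S → p a = true → p b = false → before a b = true ∧ before b a = false) :
    ∀ (xs accL accR : List α), (∀ y ∈ accL, p y = true ∧ y ∈ S) → (∀ y ∈ accR, p y = false ∧ y ∈ S) →
      (∀ y ∈ xs, y ∈ S) →
      xs.foldl (fun acc x => PySem.List.insertBy before x acc) (accL ++ accR)
        = (xs.filter p).foldl (fun acc x => PySem.List.insertBy before x acc) accL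
          ++ (xs.filter (fun x => !p x)).foldl (fun acc x => PySem.List.insertBy before x acc) accR := by
  intro xs
  induction xs with
  | nil => intro accL accR _ _ _; simp
  | cons x xs ih =>
    intro accL accR hL hR hxs
    have hxS : x ∈ S := hxs x (by simp)
    by_cases hp : p x = true
    · have hstep : PySem.List.insertBy before x (accL ++ accR)
          = PySem.List.insertBy before x accL ++ accR := by
        apply insertBy_append_left
        intro y hy
        exact (hS x y hxS (hR y hy).2 hp (hR y hy).1).1
      simp only [List.foldl_cons, hstep, List.filter_cons, hp, if_pos]
      rw [ih (PySem.List.insertBy before x accL) accR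
        (fun y hy => by
          rcases mem_insertBy' before x y accL hy with rfl | hy'
          · exact ⟨hp, hxS⟩
          · exact hL y hy')
        hR (fun y hy => hxs y (by simp [hy]))]
      simp
    · have hp' : p x = false := by simpa using hp
      have hstep : PySem.List.insertBy before x (accL ++ accR)
          = accL ++ PySem.List.insertBy before x accR := by
        apply insertBy_append_right
        intro y hy
        exact (hS y x (hL y hy).2 hxS (hL y hy).1 hp').2
      simp only [List.foldl_cons, hstep, List.filter_cons, hp']
      rw [ih accL (PySem.List.insertBy before x accR) hL
        (fun y hy => by
          rcases mem_insertBy' before x y accR hy with rfl | hy'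
          · exact ⟨hp', hxS⟩
          · exact hR y hy')
        (fun y hy => hxs y (by simp [hy]))]
      simp

lemma sorted_split {α κ : Type} [LinearOrder κ] (xs : List α) (key : α → κ) (p : α → Bool)
    (h : ∀ a b, a ∈ xs → b ∈ xs → p a = true → p b = false → key a < key b) :
    PySem.List.sorted xs key false
      = PySem.List.sorted (xs.filter p) key false
        ++ PySem.List.sorted (xs.filter (fun x => !p x)) key false := by
  rw [PySem.List.sorted_eq_foldl_insertBy, PySem.List.sorted_eq_foldl_insertBy,
    PySem.List.sorted_eq_foldl_insertBy]
  have := foldl_insertBy_split (fun a b => decide (key a < key b)) p xs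
    (fun a b ha hb hpa hpb => by
      have hlt := h a b ha hb hpa hpb
      constructor
      · simpa using hlt
      · simpa using not_lt_of_gt hlt)
    xs [] [] (by simp) (by simp) (fun y hy => hy)
  simpa using this

-- insertion with comparisons that agree on the elements involved
lemma insertBy_congr {α : Type} (b1 b2 : α → α → Bool) (x : α) (ys : List α)
    (h : ∀ y ∈ ys, b1 x y = b2 x y) :
    PySem.List.insertBy b1 x ys = PySem.List.insertBy b2 x ys := by
  induction ys with
  | nil => simp [PySem.List.insertBy]
  | cons y ys ih =>
    have hy := h y (by simp)
    simp only [PySem.List.insertBy, hy]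
    by_cases hb : b2 x y = true
    · simp [hb]
    · simp only [hb, Bool.false_eq_true, if_false, List.cons.injEq, true_and]
      exact ih (fun z hz => h z (by simp [hz]))

-- a sort only looks at comparisons between list elements
lemma sorted_congr {α κ₁ κ₂ : Type} [LinearOrder κ₁] [LinearOrder κ₂]
    (xs : List α) (k1 : α → κ₁) (k2 : α → κ₂)
    (h : ∀ a b, a ∈ xs → b ∈ xs → (decide (k1 a < k1 b) = decide (k2 a < k2 b))) :
    PySem.List.sorted xs k1 false = PySem.List.sorted xs k2 false := by
  rw [PySem.List.sorted_eq_foldl_insertBy, PySem.List.sorted_eq_foldl_insertBy]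
  have main : ∀ (ys acc : List α), (∀ y ∈ acc, y ∈ xs) → (∀ y ∈ ys, y ∈ xs) →
      ys.foldl (fun acc x => PySem.List.insertBy (fun a b => decide (k1 a < k1 b)) x acc) acc
        = ys.foldl (fun acc x => PySem.List.insertBy (fun a b => decide (k2 a < k2 b)) x acc) acc := by
    intro ys
    induction ys with
    | nil => intro acc _ _; simp
    | cons y ys ih =>
      intro acc hacc hys
      have hyx : y ∈ xs := hys y (by simp)
      simp only [List.foldl_cons]
      rw [insertBy_congr (fun a b => decide (k1 a < k1 b)) (fun a b => decide (k2 a < k2 b)) y acc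
        (fun z hz => h y z hyx (hacc z hz))]
      exact ih _ (fun z hz => by
          rcases mem_insertBy' _ y z acc hz with rfl | hz'
          · exact hyx
          · exact hacc z hz')
        (fun z hz => hys z (by simp [hz]))
  exact main xs [] (by simp) (fun y hy => hy)

lemma opsNumPred_ops_aux : opsNumPred "ops" = false := by decide

lemma sorted_singleton {α κ : Type} [LT κ] [DecidableLT κ] (x : α) (key : α → κ) :
    PySem.List.sorted [x] key false = [x] := rfl

-- ===== VERDICT (by name: the statement is the Claim_ definition above) =====
theorem ordered_group_names_py_spec : Claim_equal_ordered_group_names_py := by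
  intro group_names _
  show ordered_group_names_py group_names = ordered_group_names_py_alt group_names
  unfold ordered_group_names_py ordered_group_names_py_alt
  rw [show PySem.Set.ofList ([] : List String) = ([] : List String) from rfl, foldA_eq]
  simp only
  rw [PySem.List.dedup_eq_ofList, PySem.Set.ofList_eq_foldl]
  set U := List.foldl PySem.Set.add ([] : PySem.Set String) group_names with hU
  have hnodup : U.Nodup := by
    rw [hU, ← PySem.Set.ofList_eq_foldl]
    exact PySem.Set.nodup_ofList group_names
  -- split off the "ops" head
  have h1 : PySem.List.sorted U keyfnB false
      = PySem.List.sorted (U.filter (fun n => n == "ops")) keyfnB false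
        ++ PySem.List.sorted (U.filter (fun n => !(n == "ops"))) keyfnB false := by
    apply sorted_split
    intro a b _ _ hpa hpb
    have ha : a = "ops" := by simpa using hpa
    have hb : b ≠ "ops" := by simpa using hpb
    subst ha
    unfold keyfnB
    rw [if_pos rfl, if_neg hb]
    by_cases hnum : opsNumPred b = true
    · rw [if_pos hnum]; exact Sum.Lex.inl_lt_inr _ _
    · rw [if_neg hnum]; exact Sum.Lex.inl_lt_inr _ _
  -- the "ops" block
  have hops : PySem.List.sorted (U.filter (fun n => n == "ops")) keyfnB false
      = (if "ops" ∈ U then ["ops"] else []) := by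
    rw [List.filter_beq]
    by_cases h : "ops" ∈ U
    · rw [if_pos h, List.count_eq_one_of_mem hnodup h]
      exact sorted_singleton _ _
    · rw [if_neg h, List.count_eq_zero_of_not_mem h]
      rfl
  -- split the rest at opsNumPred
  set R := U.filter (fun n => !(n == "ops")) with hR
  have hRne : ∀ n ∈ R, n ≠ "ops" := by
    intro n hn
    have := (List.mem_filter.1 hn).2
    simpa using this
  have h2 : PySem.List.sorted R keyfnB false
      = PySem.List.sorted (R.filter (fun n => opsNumPred n)) keyfnB false
        ++ PySem.List.sorted (R.filter (fun n => !opsNumPred n)) keyfnB false := by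
    apply sorted_split
    intro a b ha hb hpa hpb
    unfold keyfnB
    rw [if_neg (hRne a ha), if_neg (hRne b hb), if_pos hpa, if_neg (by simp [hpb])]
    rw [Sum.Lex.inr_lt_inr_iff]
    exact Sum.Lex.inl_lt_inr _ _
  -- the numeric block: filter equals A's, key equals A's
  have hnumsF : R.filter (fun n => opsNumPred n) = U.filter (fun n => opsNumPred n) := by
    rw [hR, List.filter_filter]
    apply List.filter_congr
    intro n _
    by_cases h : n = "ops"
    · subst h; simp [opsNumPred_ops_aux]
    · simp [h]
  have hnums : PySem.List.sorted (R.filter (fun n => opsNumPred n)) keyfnB false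
      = PySem.List.sorted (U.filter (fun n => opsNumPred n)) (fun n => opsKey n) false := by
    rw [hnumsF]
    apply sorted_congr
    intro a b ha hb
    have hpa := (List.mem_filter.1 ha).2
    have hpb := (List.mem_filter.1 hb).2
    have hnea : a ≠ "ops" := by
      intro h; rw [h] at hpa; rw [opsNumPred_ops_aux] at hpa; cases hpa
    have hneb : b ≠ "ops" := by
      intro h; rw [h] at hpb; rw [opsNumPred_ops_aux] at hpb; cases hpb
    unfold keyfnB
    rw [if_neg hnea, if_neg hneb, if_pos hpa, if_pos hpb]
    rw [decide_eq_decide, Sum.Lex.inr_lt_inr_iff, Sum.Lex.inl_lt_inl_iff]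
  -- the remaining block: key equals identity
  have hothersKey : PySem.List.sorted (R.filter (fun n => !opsNumPred n)) keyfnB false
      = PySem.List.sorted (R.filter (fun n => !opsNumPred n)) (fun n => n) false := by
    apply sorted_congr
    intro a b ha hb
    have hpa : opsNumPred a = false := by simpa using (List.mem_filter.1 ha).2
    have hpb : opsNumPred b = false := by simpa using (List.mem_filter.1 hb).2
    unfold keyfnB
    rw [if_neg (hRne a (List.mem_filter.1 ha).1), if_neg (hRne b (List.mem_filter.1 hb).1),
      if_neg (by simp [hpa]), if_neg (by simp [hpb])]
    rw [decide_eq_decide, Sum.Lex.inr_lt_inr_iff, Sum.Lex.inr_lt_inr_iff]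
  -- A's last filter is the same remaining block
  set ordered1 : List String :=
    (if "ops" ∈ U then ["ops"] else [])
      ++ PySem.List.sorted (U.filter (fun n => opsNumPred n)) (fun n => opsKey n) false with h1A
  have hmem : ∀ n ∈ U, (n ∈ ordered1 ↔ n = "ops" ∨ opsNumPred n = true) := by
    intro n hn
    rw [h1A]
    by_cases hc : "ops" ∈ U
    · simp only [hc, if_pos, List.mem_append, List.mem_singleton, PySem.List.mem_sorted,
        List.mem_filter]
      constructor
      · rintro (h' | ⟨_, h'⟩)
        · exact Or.inl h'
        · exact Or.inr h'
      · rintro (h' | h')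
        · exact Or.inl h'
        · exact Or.inr ⟨hn, h'⟩
    · simp only [hc, List.nil_append, PySem.List.mem_sorted, List.mem_filter, if_false]
      constructor
      · rintro ⟨_, h'⟩; exact Or.inr h'
      · rintro (rfl | h')
        · exact absurd hn hc
        · exact ⟨hn, h'⟩
  have hothersF : U.filter (fun n => decide (n ∉ ordered1))
      = R.filter (fun n => !opsNumPred n) := by
    rw [hR, List.filter_filter]
    apply List.filter_congr
    intro n hn
    by_cases h : n = "ops"
    · subst h
      simp [(hmem _ hn).2 (Or.inl rfl)]
    · by_cases hp : opsNumPred n = true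
      · simp [(hmem _ hn).2 (Or.inr hp), hp]
      · have : n ∉ ordered1 := fun hin => by
          rcases (hmem _ hn).1 hin with h' | h'
          · exact h h'
          · exact hp h'
        simp [this, h, hp]
  rw [h1, hops, h2, hnums, hothersKey, hothersF, h1A, List.append_assoc]
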